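-- pv_equiv track=rewrite | github.com/JoshuaBrockschmidt/project_euler | p011/solution.py | greatest_prod_hori
-- ===== SOURCE A (Python) =====
-- def greatest_prod_hori(grid, n):
--     """ Calculate the greatest product of `n` horizontally consecutive numbers. """
--     right_limit = len(grid[0]) - n
--     max_prod = 0
--     for row in grid:
--         for x in range(right_limit):
--             prod = 1
--             for i in range(n):
--                 prod *= row[x + i]
--             max_prod = max(max_prod, prod)
--     return max_prod
-- ===== SOURCE B (Python) =====
-- def greatest_prod_hori(grid, n):
--     """ Calculate the greatest product of `n` horizontally consecutive numbers. """
--     right_limit = len(grid[0]) - n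
--     if right_limit <= 0:
--         return 0
--     if n <= 0:
--         return 1
--     best = 0
--     for row in grid:
--         # initialize the first window, tracking the product of nonzero
--         # entries and the number of zeros
--         nz = 1
--         zeros = 0
--         for v in row[:n]:
--             if v:
--                 nz *= v
--             else:
--                 zeros += 1
--         if not zeros and nz > best:
--             best = nz
--         # slide the window one cell at a time
--         for x in range(1, right_limit):
--             out = row[x - 1]
--             if out:
--                 nz //= out
--             else:
--                 zeros -= 1
--             inc = row[x + n - 1]
--             if inc:
--                 nz *= inc
--             else:
--                 zeros += 1
--             if not zeros and nz > best:
--                 best = nz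
--     return best
-- ===== Notes on version B (the rewrite author's own statement) =====
-- stated objective: alternative
-- what changed: Replaces A's recomputation of every length-n window product from scratch by a sliding window that maintains the product of the window's nonzero entries and a count of its zeros, updating both in O(1) per shift (same window set as A).
import Mathlib
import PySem

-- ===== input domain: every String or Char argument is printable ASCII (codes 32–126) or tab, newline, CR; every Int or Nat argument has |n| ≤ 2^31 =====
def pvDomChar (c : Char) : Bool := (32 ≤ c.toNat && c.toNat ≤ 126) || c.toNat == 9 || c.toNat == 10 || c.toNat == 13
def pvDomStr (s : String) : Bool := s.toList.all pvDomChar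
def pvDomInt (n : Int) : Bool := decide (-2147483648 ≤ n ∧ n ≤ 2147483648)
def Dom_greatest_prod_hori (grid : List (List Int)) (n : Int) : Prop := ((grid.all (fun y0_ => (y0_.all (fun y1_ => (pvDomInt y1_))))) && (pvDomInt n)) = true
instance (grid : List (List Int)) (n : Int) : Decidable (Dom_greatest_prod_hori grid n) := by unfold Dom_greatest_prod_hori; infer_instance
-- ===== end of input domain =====

-- B replaces A's recomputation of each length-n window product from scratch by a
-- sliding window that maintains the product of the nonzero entries and a zero count,
-- updated in O(1) per shift; same window set as A (x in range(len(grid[0])-n)).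

-- ===== PORT A =====
def greatest_prod_hori (grid : List (List Int)) (n : Int) : Int :=
  let right_limit : Int := ((grid.headD []).length : Int) - n
  grid.foldl (fun max_prod row =>
    (PySem.List.pyRange 0 right_limit 1).foldl (fun max_prod x =>
      let prod := (PySem.List.pyRange 0 n 1).foldl
        (fun prod i => prod * PySem.List.pyGetD row (x + i) 0) 1
      max max_prod prod) max_prod) 0

-- ===== PORT B =====
-- first-window scan of Source B: (nz, zeros) over row[:n]
def gphRowInit (row : List Int) (n : Int) : Int × Int :=
  (PySem.List.slice row none (some n)).foldl
    (fun (s : Int × Int) v => if v ≠ 0 then (s.1 * v, s.2) else (s.1, s.2 + 1)) (1, 0)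

-- one iteration of Source B's sliding loop; state = (best, nz, zeros), loop variable x
def gphStep (row : List Int) (n : Int) (s : Int × Int × Int) (x : Int) : Int × Int × Int :=
  let out := PySem.List.pyGetD row (x - 1) 0
  let nz1 : Int := if out ≠ 0 then PySem.Int.floordiv s.2.1 out else s.2.1
  let z1 : Int := if out ≠ 0 then s.2.2 else s.2.2 - 1
  let inc := PySem.List.pyGetD row (x + n - 1) 0
  let nz2 : Int := if inc ≠ 0 then nz1 * inc else nz1
  let z2 : Int := if inc ≠ 0 then z1 else z1 + 1
  (if z2 = 0 ∧ nz2 > s.1 then nz2 else s.1, nz2, z2)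

def greatest_prod_hori_alt (grid : List (List Int)) (n : Int) : Int :=
  let right_limit : Int := ((grid.headD []).length : Int) - n
  if right_limit ≤ 0 then 0
  else if n ≤ 0 then 1
  else
    grid.foldl (fun best row =>
      let init := gphRowInit row n
      let best1 := if init.2 = 0 ∧ init.1 > best then init.1 else best
      ((PySem.List.pyRange 1 right_limit 1).foldl (gphStep row n)
        (best1, init.1, init.2)).1) 0

-- ===== PRECONDITION & SPEC =====
-- Exactly the inputs where Python A returns (elsewhere it raises IndexError):
-- the grid is nonempty, and when some window is actually scanned (n > 0 and
-- len(grid[0]) - n > 0) every row reaches index len(grid[0]) - 2.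
def Pre_greatest_prod_hori (grid : List (List Int)) (n : Int) : Prop :=
  grid ≠ [] ∧
    (0 < n → 0 < ((grid.headD []).length : Int) - n →
      ∀ row ∈ grid, ((grid.headD []).length : Int) - 1 ≤ (row.length : Int))
instance (grid : List (List Int)) (n : Int) : Decidable (Pre_greatest_prod_hori grid n) := by
  unfold Pre_greatest_prod_hori; infer_instance

def pvWitness_greatest_prod_hori : List (List Int) × Int := ([[1, -2, 3, 0], [4, 5, -6, 7]], 2)

def Spec_greatest_prod_hori (grid : List (List Int)) (n : Int) (out : Int) : Prop := out = greatest_prod_hori_alt grid n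
instance (grid : List (List Int)) (n : Int) (out : Int) : Decidable (Spec_greatest_prod_hori grid n out) := by unfold Spec_greatest_prod_hori; infer_instance

-- ===== CLAIM (what is proved, stated in full; the proofs are below) =====
def Claim_equal_greatest_prod_hori : Prop := ∀ (grid : List (List Int)) (n : Int), Dom_greatest_prod_hori grid n → Pre_greatest_prod_hori grid n → Spec_greatest_prod_hori grid n (greatest_prod_hori grid n)

-- ===== LEMMAS AND PROOFS =====

-- product of the nonzero entries of the window [x, x+m) (missing cells read as 0)
def gphNzp (row : List Int) (x : Int) : Nat → Int
  | 0 => 1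
  | m + 1 => gphNzp row x m *
      (if PySem.List.pyGetD row (x + m) 0 ≠ 0 then PySem.List.pyGetD row (x + m) 0 else 1)

-- number of zero entries of the window [x, x+m)
def gphZc (row : List Int) (x : Int) : Nat → Nat
  | 0 => 0
  | m + 1 => gphZc row x m + (if PySem.List.pyGetD row (x + m) 0 = 0 then 1 else 0)

-- front recursions
theorem gphNzp_front (row : List Int) (x : Int) (m : Nat) :
    gphNzp row x (m + 1) =
      (if PySem.List.pyGetD row x 0 ≠ 0 then PySem.List.pyGetD row x 0 else 1) *
        gphNzp row (x + 1) m := by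
  induction m with
  | zero => simp [gphNzp]
  | succ k ih =>
      rw [show gphNzp row x (k + 1 + 1) = gphNzp row x (k + 1) *
        (if PySem.List.pyGetD row (x + (k + 1)) 0 ≠ 0 then PySem.List.pyGetD row (x + (k + 1)) 0 else 1) from rfl,
        ih, show (x + (k + 1) : Int) = (x + 1) + k by ring]
      rw [mul_assoc]
      rfl

theorem gphZc_front (row : List Int) (x : Int) (m : Nat) :
    gphZc row x (m + 1) =
      (if PySem.List.pyGetD row x 0 = 0 then 1 else 0) + gphZc row (x + 1) m := by
  induction m with
  | zero => simp [gphZc]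
  | succ k ih =>
      rw [show gphZc row x (k + 1 + 1) = gphZc row x (k + 1) +
        (if PySem.List.pyGetD row (x + (k + 1)) 0 = 0 then 1 else 0) from rfl,
        ih, show (x + (k + 1) : Int) = (x + 1) + k by ring]
      rw [Nat.add_assoc]
      rfl

-- A's window product over the window [x, x+m)
theorem gphProdA (row : List Int) (x : Int) (m : Nat) :
    (PySem.List.pyRange 0 (m : Int) 1).foldl
        (fun prod i => prod * PySem.List.pyGetD row (x + i) 0) 1 =
      if gphZc row x m = 0 then gphNzp row x m else 0 := by
  induction m with
  | zero => simp [gphZc, gphNzp]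
  | succ k ih =>
      rw [show ((k + 1 : Nat) : Int) = (k : Int) + 1 by push_cast; ring,
        PySem.List.pyRange_one_succ_right (by positivity), List.foldl_append, ih]
      simp only [List.foldl_cons, List.foldl_nil, gphZc, gphNzp]
      by_cases hz : gphZc row x k = 0 <;> by_cases hv : PySem.List.pyGetD row (x + (k : Int)) 0 = 0 <;>
        simp [hz, hv]

-- Source B's first-window scan computes the invariant for window 0
theorem gphRowInit_eq (row : List Int) (m : Nat) (hm : m ≤ row.length) :
    gphRowInit row (m : Int) = (gphNzp row 0 m, (gphZc row 0 m : Int)) := by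
  unfold gphRowInit
  rw [PySem.List.slice_to_natCast]
  induction m with
  | zero => simp [gphNzp, gphZc]
  | succ k ih =>
      have hk : k < row.length := by omega
      rw [List.take_add_one, List.getElem?_eq_getElem hk]
      simp only [Option.toList, List.foldl_append, List.foldl_cons, List.foldl_nil]
      rw [ih (by omega)]
      have hget : PySem.List.pyGetD row ((0 : Int) + (k : Nat)) 0 = row[k] := by
        rw [show ((0 : Int) + (k : Nat)) = ((k : Nat) : Int) by ring]
        simp [PySem.List.pyGetD_natCast, List.getD_eq_getElem?_getD, List.getElem?_eq_getElem hk]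
      by_cases hv : row[k] = 0 <;>
        simp [gphNzp, gphZc, hv, Nat.cast_add, List.getElem?_eq_getElem hk]

-- one slide step: from the invariant at window x-1 to the invariant at window x
theorem gphStep_eq (row : List Int) (m : Nat) (hm : 0 < m) (x : Int) (best : Int) :
    gphStep row (m : Int) (best, gphNzp row (x - 1) m, (gphZc row (x - 1) m : Int)) x =
      (if (gphZc row x m : Int) = 0 ∧ gphNzp row x m > best then gphNzp row x m else best,
        gphNzp row x m, (gphZc row x m : Int)) := by
  obtain ⟨k, rfl⟩ : ∃ k, m = k + 1 := ⟨m - 1, by omega⟩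
  have hfront := gphNzp_front row (x - 1) k
  have hzfront := gphZc_front row (x - 1) k
  rw [show (x - 1 + 1 : Int) = x by ring] at hfront hzfront
  have hback : gphNzp row x (k + 1) = gphNzp row x k *
      (if PySem.List.pyGetD row (x + k) 0 ≠ 0 then PySem.List.pyGetD row (x + k) 0 else 1) := rfl
  have hzback : gphZc row x (k + 1) = gphZc row x k +
      (if PySem.List.pyGetD row (x + k) 0 = 0 then 1 else 0) := rfl
  unfold gphStep
  simp only
  rw [show (x + ((k + 1 : Nat) : Int) - 1 : Int) = x + (k : Int) by push_cast; ring]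
  set o := PySem.List.pyGetD row (x - 1) 0 with ho
  set i := PySem.List.pyGetD row (x + (k : Int)) 0 with hi
  have hnz1 : (if o ≠ 0 then PySem.Int.floordiv (gphNzp row (x - 1) (k + 1)) o
      else gphNzp row (x - 1) (k + 1)) = gphNzp row x k := by
    by_cases hov : o = 0
    · simp [hov, hfront]
    · rw [if_pos hov, hfront, if_pos hov]
      simp only [PySem.Int.floordiv]
      exact Int.mul_fdiv_cancel_left _ hov
  have hz1 : (if o ≠ 0 then ((gphZc row (x - 1) (k + 1) : Nat) : Int)
      else ((gphZc row (x - 1) (k + 1) : Nat) : Int) - 1) = ((gphZc row x k : Nat) : Int) := by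
    rw [hzfront]; by_cases hov : o = 0 <;> simp [hov]
  have hnz2 : (if i ≠ 0 then gphNzp row x k * i else gphNzp row x k) = gphNzp row x (k + 1) := by
    rw [hback]; by_cases hiv : i = 0 <;> simp [hiv]
  have hz2 : (if i ≠ 0 then ((gphZc row x k : Nat) : Int)
      else ((gphZc row x k : Nat) : Int) + 1) = ((gphZc row x (k + 1) : Nat) : Int) := by
    rw [hzback]; by_cases hiv : i = 0 <;> simp [hiv]
  rw [hnz1, hz1, hnz2, hz2]

-- B's sliding loop over [x, rl) equals A's max loop over the same windows
theorem gphLoop (row : List Int) (m : Nat) (hm : 0 < m) (rl : Int) :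
    ∀ (k : Nat) (x : Int), x = rl - k → ∀ best : Int, 0 ≤ best →
      ((PySem.List.pyRange x rl 1).foldl (gphStep row (m : Int))
          (best, gphNzp row (x - 1) m, (gphZc row (x - 1) m : Int))).1 =
        (PySem.List.pyRange x rl 1).foldl
          (fun b y => max b
            ((PySem.List.pyRange 0 (m : Int) 1).foldl
              (fun prod i => prod * PySem.List.pyGetD row (y + i) 0) 1)) best := by
  intro k
  induction k with
  | zero =>
      intro x hx best _
      rw [PySem.List.pyRange_one_eq_nil (by omega)]
      rfl
  | succ j ih =>
      intro x hx best hbest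
      by_cases hlt : x < rl
      · rw [PySem.List.pyRange_one_cons hlt]
        simp only [List.foldl_cons]
        rw [gphStep_eq row m hm x best, gphProdA row x m]
        have hmax : (if (gphZc row x m : Int) = 0 ∧ gphNzp row x m > best then gphNzp row x m else best)
            = max best (if gphZc row x m = 0 then gphNzp row x m else 0) := by
          by_cases hz : gphZc row x m = 0 <;> simp [hz] <;> omega
        have hthis := ih (x + 1) (by omega)
          (if (gphZc row x m : Int) = 0 ∧ gphNzp row x m > best then gphNzp row x m else best)
          (by by_cases hz : (gphZc row x m : Int) = 0 ∧ gphNzp row x m > best <;> simp [hz] <;> omega)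
        rw [show (x + 1 - 1 : Int) = x by ring] at hthis
        rw [hthis, hmax]
      · rw [PySem.List.pyRange_one_eq_nil (by omega)]
        rfl

-- per-row: B's row pass equals A's row pass (windows 0 .. rl-1), for a long-enough row
theorem gphRow (row : List Int) (m : Nat) (hm : 0 < m) (rl : Int) (hrl : 0 < rl)
    (hlen : m ≤ row.length) (best : Int) (hbest : 0 ≤ best) :
    (let init := gphRowInit row (m : Int)
      let best1 := if init.2 = 0 ∧ init.1 > best then init.1 else best
      ((PySem.List.pyRange 1 rl 1).foldl (gphStep row (m : Int)) (best1, init.1, init.2)).1) =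
      (PySem.List.pyRange 0 rl 1).foldl
        (fun b y => max b
          ((PySem.List.pyRange 0 (m : Int) 1).foldl
            (fun prod i => prod * PySem.List.pyGetD row (y + i) 0) 1)) best := by
  simp only
  rw [gphRowInit_eq row m hlen]
  rw [PySem.List.pyRange_one_cons hrl, List.foldl_cons, gphProdA row 0 m]
  have hmax : (if (gphZc row 0 m : Int) = 0 ∧ gphNzp row 0 m > best then gphNzp row 0 m else best)
      = max best (if gphZc row 0 m = 0 then gphNzp row 0 m else 0) := by
    by_cases hz : gphZc row 0 m = 0 <;> simp [hz] <;> omega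
  have hloop := gphLoop row m hm rl (rl - 1).toNat 1 (by omega)
    (if (gphZc row 0 m : Int) = 0 ∧ gphNzp row 0 m > best then gphNzp row 0 m else best)
    (by by_cases hz : (gphZc row 0 m : Int) = 0 ∧ gphNzp row 0 m > best <;> simp [hz] <;> omega)
  rw [show (1 - 1 : Int) = 0 by ring] at hloop
  rw [hloop, hmax]
  norm_num

-- A's running max stays nonnegative
theorem gphA_nonneg (f : Int → Int) (l : List Int) (b : Int) (hb : 0 ≤ b) :
    0 ≤ l.foldl (fun acc y => max acc (f y)) b := by
  induction l generalizing b with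
  | nil => exact hb
  | cons h t ih => exact ih _ (le_trans hb (le_max_left _ _))

-- trivial-loop folds used in the degenerate cases
theorem gphFold_id (l : List (List Int)) (b : Int) : l.foldl (fun acc _ => acc) b = b := by
  induction l generalizing b with
  | nil => rfl
  | cons h t ih => exact ih b

theorem gphFold_max_one (l : List Int) (b : Int) :
    l.foldl (fun acc _ => max acc 1) b = if l = [] then b else max b 1 := by
  induction l generalizing b with
  | nil => rfl
  | cons h t ih =>
      simp only [List.foldl_cons]
      rw [ih]
      by_cases ht : t = [] <;> simp [ht]

theorem gphFold_max_one_rows (l : List (List Int)) (rl : Int) (hrl : 0 < rl) (b : Int) :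
    l.foldl (fun acc _ => (PySem.List.pyRange 0 rl 1).foldl (fun a2 _ => max a2 1) acc) b =
      if l = [] then b else max b 1 := by
  induction l generalizing b with
  | nil => rfl
  | cons h t ih =>
      have hne : PySem.List.pyRange 0 rl 1 ≠ [] := by
        rw [PySem.List.pyRange_one_cons hrl]; simp
      simp only [List.foldl_cons]
      rw [gphFold_max_one, if_neg hne, ih]
      by_cases ht : t = [] <;> simp [ht]

-- ===== VERDICT (by name: the statement is the Claim_ definition above) =====
theorem greatest_prod_hori_spec : Claim_equal_greatest_prod_hori := by
  intro grid n _ hpre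
  obtain ⟨hne, hrows⟩ := hpre
  unfold Spec_greatest_prod_hori greatest_prod_hori greatest_prod_hori_alt
  simp only
  set w : Int := ((grid.headD []).length : Int) with hw
  by_cases hrl : w - n ≤ 0
  · -- no window is scanned: both are 0
    rw [if_pos hrl,
      show PySem.List.pyRange 0 (w - n) 1 = [] from PySem.List.pyRange_one_eq_nil (by omega)]
    simp only [List.foldl_nil]
    exact gphFold_id grid 0
  · rw [if_neg hrl]
    by_cases hn : n ≤ 0
    · -- empty products: both are 1
      rw [if_pos hn,
        show PySem.List.pyRange 0 n 1 = [] from PySem.List.pyRange_one_eq_nil (by omega)]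
      simp only [List.foldl_nil]
      rw [gphFold_max_one_rows grid (w - n) (by omega) 0, if_neg hne]
      simp
    · rw [if_neg hn]
      -- main case: fold the rows, applying the per-row lemma
      obtain ⟨m, hm⟩ : ∃ m : Nat, n = (m : Int) := ⟨n.toNat, by omega⟩
      have hmpos : 0 < m := by omega
      have hlen : ∀ row ∈ grid, m ≤ row.length := by
        intro row hr
        have := hrows (by omega) (by omega) row hr
        omega
      subst hm
      -- generalize over the accumulator and induct on the rows
      suffices h : ∀ (l : List (List Int)), (∀ row ∈ l, m ≤ row.length) → ∀ b : Int, 0 ≤ b →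
          l.foldl (fun best row =>
            let init := gphRowInit row (m : Int)
            let best1 := if init.2 = 0 ∧ init.1 > best then init.1 else best
            ((PySem.List.pyRange 1 (w - (m : Int)) 1).foldl (gphStep row (m : Int))
              (best1, init.1, init.2)).1) b =
          l.foldl (fun max_prod row =>
            (PySem.List.pyRange 0 (w - (m : Int)) 1).foldl (fun mp x =>
              max mp ((PySem.List.pyRange 0 (m : Int) 1).foldl
                (fun prod i => prod * PySem.List.pyGetD row (x + i) 0) 1)) max_prod) b by
        exact (h grid hlen 0 le_rfl).symm
      intro l hl
      induction l with
      | nil => intro b _; rfl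
      | cons r t ih =>
          intro b hb
          simp only [List.foldl_cons]
          rw [gphRow r m hmpos (w - (m : Int)) (by omega) (hl r (by simp)) b hb]
          exact ih (fun row hr => hl row (by simp [hr]))
            _ (gphA_nonneg _ _ b hb)
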